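-- pv_equiv track=rewrite | github.com/MarioPasc/IsalGraph | docs/original_code_and_files/IsalGraph4feb2026c/IsalGraph/graphtostring.py | generate_pairs_sorted_by_sum
-- ===== SOURCE A (Python) =====
-- from typing import List, Set, Tuple
--
-- def generate_pairs_sorted_by_sum(m: int) -> List[Tuple[int, int]]:
--     """
--     Generate all integer pairs (a, b) such that a, b ∈ {-M, ..., 0, ..., M},
--     and return them sorted in increasing order of a + b.
--
--     Args:
--         m (int): A positive integer defining the range bounds.
--
--     Returns:
--         List[Tuple[int, int]]: A list of two-element integer tuples (a, b),
--         sorted by the value of a + b in increasing order.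
--
--     Raises:
--         ValueError: If M is not a positive integer.
--     """
--     # Check that the input M is a positive integer.
--     if m <= 0:
--         # Raise an error if the input constraint is violated.
--         raise ValueError("M must be a positive integer.")
--
--     # Initialize an empty list to store the resulting pairs.
--     pairs: List[Tuple[int, int]] = []
--
--     # Iterate over all possible values of a in the range [-M, M].
--     for a in range(-m, m + 1):
--         # Iterate over all possible values of b in the range [-M, M].
--         for b in range(-m, m + 1):
--             # Append the current pair (a, b) to the list.
--             pairs.append((a, b))
--
--     # Sort the list of pairs by the sum a + b in increasing order.
--     pairs.sort(key=lambda pair: pair[0] + pair[1])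
--
--     # Return the sorted list of pairs.
--     return pairs
-- ===== SOURCE B (Python) =====
-- def generate_pairs_sorted_by_sum(m: int):
--     if m <= 0:
--         raise ValueError("M must be a positive integer.")
--     pairs = []
--     for s in range(-2 * m, 2 * m + 1):
--         for a in range(max(-m, s - m), min(m, s + m) + 1):
--             pairs.append((a, s - a))
--     return pairs
-- ===== Notes on version B (the rewrite author's own statement) =====
-- stated objective: faster
-- what changed: B emits the pairs directly grouped by ascending sum s, with a ascending inside each group (the stable-sort order), instead of materialising all (2m+1)^2 pairs and sorting them by sum.
import Mathlib
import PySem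

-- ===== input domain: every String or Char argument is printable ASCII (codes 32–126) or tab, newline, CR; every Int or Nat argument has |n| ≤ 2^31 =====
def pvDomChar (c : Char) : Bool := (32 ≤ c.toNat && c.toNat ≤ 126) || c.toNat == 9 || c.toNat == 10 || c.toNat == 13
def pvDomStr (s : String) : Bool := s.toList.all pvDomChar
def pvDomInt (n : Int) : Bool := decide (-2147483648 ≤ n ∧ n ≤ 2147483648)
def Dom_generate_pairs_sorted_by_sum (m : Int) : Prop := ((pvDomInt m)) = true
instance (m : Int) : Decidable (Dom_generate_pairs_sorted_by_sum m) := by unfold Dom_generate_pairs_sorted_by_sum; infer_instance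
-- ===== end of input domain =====

-- B builds the result directly grouped by ascending sum (a ascending within a group) instead of
-- materialising all pairs and sorting by sum; equivalence is about the return value.

-- ===== PORT A =====
def generate_pairs_sorted_by_sum (m : Int) : List (Int × Int) :=
  -- pairs = []; for a in range(-m, m+1): for b in range(-m, m+1): pairs.append((a, b))
  let pairs : List (Int × Int) :=
    (PySem.List.pyRange (-m) (m + 1) 1).foldl
      (fun pairs a =>
        (PySem.List.pyRange (-m) (m + 1) 1).foldl
          (fun pairs b => pairs ++ [(a, b)]) pairs) []
  -- pairs.sort(key=lambda pair: pair[0] + pair[1])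
  PySem.List.sorted pairs (fun pair => pair.1 + pair.2) false

-- ===== PORT B =====
def generate_pairs_sorted_by_sum_alt (m : Int) : List (Int × Int) :=
  -- for s in range(-2*m, 2*m+1): for a in range(max(-m, s-m), min(m, s+m)+1): pairs.append((a, s-a))
  (PySem.List.pyRange (-(2 * m)) (2 * m + 1) 1).foldl
    (fun pairs s =>
      (PySem.List.pyRange (max (-m) (s - m)) (min m (s + m) + 1) 1).foldl
        (fun pairs a => pairs ++ [(a, s - a)]) pairs) []

-- ===== PRECONDITION & SPEC =====
-- Python A raises ValueError for m <= 0 ("M must be a positive integer."); those inputs are excluded.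
def Pre_generate_pairs_sorted_by_sum (m : Int) : Prop := 0 < m
instance (m : Int) : Decidable (Pre_generate_pairs_sorted_by_sum m) := by unfold Pre_generate_pairs_sorted_by_sum; infer_instance
def pvWitness_generate_pairs_sorted_by_sum : Int := (2)

def Spec_generate_pairs_sorted_by_sum (m : Int) (out : List (Int × Int)) : Prop := out = generate_pairs_sorted_by_sum_alt m
instance (m : Int) (out : List (Int × Int)) : Decidable (Spec_generate_pairs_sorted_by_sum m out) := by unfold Spec_generate_pairs_sorted_by_sum; infer_instance

-- ===== CLAIM (what is proved, stated in full; the proofs are below) =====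
def Claim_equal_generate_pairs_sorted_by_sum : Prop := ∀ (m : Int), Dom_generate_pairs_sorted_by_sum m → Pre_generate_pairs_sorted_by_sum m → Spec_generate_pairs_sorted_by_sum m (generate_pairs_sorted_by_sum m)

-- ===== LEMMAS AND PROOFS =====

-- insertBy walks past a prefix whose elements are all not-before x
theorem insertBy_append_of_not {α : Type} (bef : α → α → Bool) (x : α) (p q : List α)
    (h : ∀ y ∈ p, bef x y = false) :
    PySem.List.insertBy bef x (p ++ q) = p ++ PySem.List.insertBy bef x q := by
  induction p with
  | nil => simp
  | cons y p ih =>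
    have hy : bef x y = false := h y (by simp)
    simp [PySem.List.insertBy, hy, ih (fun z hz => h z (by simp [hz]))]

-- insertBy puts x in front when every element is before-able
theorem insertBy_of_forall_before {α : Type} (bef : α → α → Bool) (x : α) (q : List α)
    (h : ∀ y ∈ q, bef x y = true) :
    PySem.List.insertBy bef x q = x :: q := by
  cases q with
  | nil => simp [PySem.List.insertBy]
  | cons y q => simp [PySem.List.insertBy, h y (by simp)]

-- inserting x into a key-grouped list appends x at the end of its own group (stability)
theorem insertBy_grouped (key : Int × Int → Int) (x : Int × Int) (gP : Int → List (Int × Int))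
    (hg : ∀ s, ∀ y ∈ gP s, key y = s) :
    ∀ S : List Int, S.Pairwise (· < ·) → key x ∈ S →
      PySem.List.insertBy (fun a b => decide (key a < key b)) x (S.flatMap gP) =
        S.flatMap (fun s => gP s ++ if key x = s then [x] else []) := by
  intro S
  induction S with
  | nil => intro _ h; simp at h
  | cons s S ih =>
    intro hpw hmem
    have hlt : ∀ s' ∈ S, s < s' := by
      intro s' hs'; exact (List.pairwise_cons.mp hpw).1 s' hs'
    have hpf : ∀ y ∈ gP s, key y = s := hg s
    rcases List.mem_cons.mp hmem with hx | hx
    · -- key x = s : skip gP s (keys equal), x goes before flatMap gP S (keys all greater)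
      have h1 : ∀ y ∈ gP s, (fun a b => decide (key a < key b)) x y = false := by
        intro y hy; simp [hpf y hy, hx]
      have h2 : ∀ y ∈ S.flatMap gP, (fun a b => decide (key a < key b)) x y = true := by
        intro y hy
        rcases List.mem_flatMap.mp hy with ⟨s', hs', hy'⟩
        have := hg s' y hy'
        have := hlt s' hs'
        simp; omega
      rw [List.flatMap_cons, insertBy_append_of_not _ _ _ _ h1,
          insertBy_of_forall_before _ _ _ h2]
      have h3 : S.flatMap (fun s' => gP s' ++ if key x = s' then [x] else []) = S.flatMap gP := by
        apply List.flatMap_congr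
        intro s' hs'
        have := hlt s' hs'
        rw [if_neg (by omega), List.append_nil]
      rw [List.flatMap_cons, h3, if_pos hx]
      simp
    · -- key x ∈ S, so s < key x and x passes the whole group gP s
      have hslt : s < key x := hlt _ hx
      have h1 : ∀ y ∈ gP s, (fun a b => decide (key a < key b)) x y = false := by
        intro y hy; simp [hpf y hy]; omega
      rw [List.flatMap_cons, insertBy_append_of_not _ _ _ _ h1,
          ih (List.pairwise_cons.mp hpw).2 hx]
      have : (if key x = s then [x] else ([] : List (Int × Int))) = [] := by
        rw [if_neg]; omega
      simp [this]

-- stable sort = groups of equal key, in ascending key order, original order within a group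
theorem sorted_groups (key : Int × Int → Int) :
    ∀ (P : List (Int × Int)) (S : List Int), S.Pairwise (· < ·) → (∀ x ∈ P, key x ∈ S) →
      PySem.List.sorted P key false =
        S.flatMap (fun s => P.filter (fun x => decide (key x = s))) := by
  intro P
  induction P using List.reverseRecOn with
  | nil => intro S _ _; simp [PySem.List.sorted_eq_foldl_insertBy]
  | append_singleton P x ih =>
    intro S hpw hkeys
    have hP : ∀ y ∈ P, key y ∈ S := fun y hy => hkeys y (by simp [hy])
    have hx : key x ∈ S := hkeys x (by simp)
    rw [PySem.List.sorted_eq_foldl_insertBy, List.foldl_append, List.foldl_cons, List.foldl_nil,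
        ← PySem.List.sorted_eq_foldl_insertBy, ih S hpw hP]
    rw [insertBy_grouped key x _ (by intro s y hy; simpa using (List.mem_filter.mp hy).2) S hpw hx]
    congr 1
    funext s
    simp [List.filter_append]
    by_cases h : key x = s <;> simp [h]

-- a comprehension guarded by a decidable condition is a filtered map
theorem flatMap_if_singleton {α β : Type} (P : α → Prop) [DecidablePred P] (f : α → β) :
    ∀ l : List α, l.flatMap (fun a => if P a then [f a] else []) =
      (l.filter (fun a => decide (P a))).map f := by
  intro l
  induction l with
  | nil => rfl
  | cons a l ih =>
    by_cases h : P a <;> simp [List.flatMap_cons, h, ih]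

-- filtering a unit-step range for one value
theorem filter_pyRange_point (c : Int) :
    ∀ (n : Nat) (lo hi : Int), (hi - lo).toNat = n →
      (PySem.List.pyRange lo hi 1).filter (fun b => decide (b = c)) =
        if lo ≤ c ∧ c < hi then [c] else [] := by
  intro n
  induction n with
  | zero =>
    intro lo hi h
    rw [PySem.List.pyRange_one_eq_nil (by omega)]
    rw [if_neg (by omega)]
    rfl
  | succ n ih =>
    intro lo hi h
    rw [PySem.List.pyRange_one_cons (by omega), List.filter_cons]
    by_cases hc : lo = c
    · have h2 : (PySem.List.pyRange (lo + 1) hi 1).filter (fun b => decide (b = c)) = [] := by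
        rw [ih (lo + 1) hi (by omega)]
        exact if_neg (by omega)
      rw [h2, if_pos (show lo ≤ c ∧ c < hi by omega)]
      simp [hc]
    · rw [ih (lo + 1) hi (by omega)]
      simp [hc]
      exact if_congr (by omega) rfl rfl

-- filtering a unit-step range by an interval
theorem filter_pyRange_interval (lo' hi' : Int) :
    ∀ (n : Nat) (lo hi : Int), (hi - lo).toNat = n →
      (PySem.List.pyRange lo hi 1).filter (fun a => decide (lo' ≤ a ∧ a ≤ hi')) =
        PySem.List.pyRange (max lo lo') (min hi (hi' + 1)) 1 := by
  intro n
  induction n with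
  | zero =>
    intro lo hi h
    rw [PySem.List.pyRange_one_eq_nil (by omega), PySem.List.pyRange_one_eq_nil (by omega)]
    rfl
  | succ n ih =>
    intro lo hi h
    rw [PySem.List.pyRange_one_cons (by omega), List.filter_cons, ih (lo + 1) hi (by omega)]
    by_cases hc : lo' ≤ lo ∧ lo ≤ hi'
    · have hmax : max (lo + 1) lo' = lo + 1 := by omega
      have hmax2 : max lo lo' = lo := by omega
      rw [hmax, hmax2]
      have : PySem.List.pyRange lo (min hi (hi' + 1)) 1 =
          lo :: PySem.List.pyRange (lo + 1) (min hi (hi' + 1)) 1 :=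
        PySem.List.pyRange_one_cons (by omega)
      simp [hc, this]
    · rcases (by omega : lo < lo' ∨ hi' < lo) with hlt | hgt
      · have : max (lo + 1) lo' = max lo lo' := by omega
        simp [hc, this]
      · rw [PySem.List.pyRange_one_eq_nil (by omega), PySem.List.pyRange_one_eq_nil (by omega)]
        simp
        omega

theorem generate_pairs_sorted_by_sum_spec : Claim_equal_generate_pairs_sorted_by_sum := by
  intro m _ _
  unfold Spec_generate_pairs_sorted_by_sum
  unfold generate_pairs_sorted_by_sum generate_pairs_sorted_by_sum_alt
  -- turn both append-loops into flatMap/map form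
  simp only [PySem.List.foldl_append_singleton_eq_map, PySem.List.foldl_append_eq_flatMap,
    List.nil_append]
  set R : List (Int × Int) :=
    (PySem.List.pyRange (-m) (m + 1) 1).flatMap
      (fun a => (PySem.List.pyRange (-m) (m + 1) 1).map (fun b => (a, b))) with hR
  -- group the stable sort by ascending sum
  rw [sorted_groups (fun p => p.1 + p.2) R (PySem.List.pyRange (-(2 * m)) (2 * m + 1) 1)
      (PySem.List.pairwise_lt_pyRange_one _ _)
      (by
        intro p hp
        rcases List.mem_flatMap.mp hp with ⟨a, ha, hp'⟩
        rcases List.mem_map.mp hp' with ⟨b, hb, rfl⟩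
        have ha' := PySem.List.mem_pyRange_one.mp ha
        have hb' := PySem.List.mem_pyRange_one.mp hb
        exact PySem.List.mem_pyRange_one.mpr (by simp; omega))]
  apply List.flatMap_congr
  intro s _
  -- compute the filter of R at sum s
  rw [hR, List.filter_flatMap]
  have hinner : ∀ a : Int,
      ((PySem.List.pyRange (-m) (m + 1) 1).map (fun b => (a, b))).filter
          (fun p => decide (p.1 + p.2 = s)) =
        if -m ≤ s - a ∧ s - a < m + 1 then [(a, s - a)] else [] := by
    intro a
    rw [List.filter_map]
    have hcomp : ((fun p : Int × Int => decide (p.1 + p.2 = s)) ∘ (fun b => (a, b))) =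
        (fun b => decide (b = s - a)) := by
      funext b; simp; omega
    rw [hcomp, filter_pyRange_point (s - a) (m + 1 - -m).toNat (-m) (m + 1) rfl]
    split_ifs <;> simp
  calc (PySem.List.pyRange (-m) (m + 1) 1).flatMap
        (fun a => ((PySem.List.pyRange (-m) (m + 1) 1).map (fun b => (a, b))).filter
          (fun p => decide (p.1 + p.2 = s)))
      = (PySem.List.pyRange (-m) (m + 1) 1).flatMap
          (fun a => if s - m ≤ a ∧ a ≤ s + m then [(a, s - a)] else []) := by
        apply List.flatMap_congr
        intro a _
        rw [hinner a]
        exact if_congr (by omega) rfl rfl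
    _ = ((PySem.List.pyRange (-m) (m + 1) 1).filter
          (fun a => decide (s - m ≤ a ∧ a ≤ s + m))).map (fun a => (a, s - a)) :=
        flatMap_if_singleton _ _ _
    _ = (PySem.List.pyRange (max (-m) (s - m)) (min (m + 1) (s + m + 1)) 1).map
          (fun a => (a, s - a)) := by
        rw [filter_pyRange_interval (s - m) (s + m) (m + 1 - -m).toNat (-m) (m + 1) rfl]
    _ = (PySem.List.pyRange (max (-m) (s - m)) (min m (s + m) + 1) 1).map
          (fun a => (a, s - a)) := by
        have hmin : min (m + 1) (s + m + 1) = min m (s + m) + 1 := by omega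
        rw [hmin]
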